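-- pv_equiv track=rewrite | github.com/shiien14/codingtest | 프로그래머스/2/12913. 땅따먹기/땅따먹기.py | solution
-- ===== SOURCE A (Python) =====
-- from copy import deepcopy
--
-- def solution(land):
--     answer = deepcopy(land)
--
--     for i in range(1,len(land)):
--         for j in range(len(land[i])):
--             for k in range(len(land[i])):
--                 if j==k:
--                     continue
--                 else:
--                     answer[i][k]=max(answer[i][k], answer[i-1][j]+land[i][k])
--
--     return max(answer[-1])
-- ===== SOURCE B (Python) =====
-- def solution(land):
--     dp = list(land[0])
--     for row in land[1:]:
--         m = len(row)
--         if m >= 2: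
--             p = dp[:m]
--             # pref[k] = max(0, p[0], ..., p[k-1]); suf[k] = max(0, p[k], ..., p[m-1])
--             pref = [0] * (m + 1)
--             for j in range(m):
--                 pref[j + 1] = max(pref[j], p[j])
--             suf = [0] * (m + 1)
--             for j in range(m - 1, -1, -1):
--                 suf[j] = max(p[j], suf[j + 1])
--             dp = [row[k] + max(pref[k], suf[k + 1]) for k in range(m)]
--         else:
--             dp = list(row)
--     return max(dp)
-- ===== Notes on version B (the rewrite author's own statement) =====
-- stated objective: alternative
-- what changed: Replaces A's per-row nested j/k scans over a mutated copy of the grid by prefix/suffix running maxima of the previous dp row, obtaining each best-excluding-column value in O(1) per cell.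
import Mathlib
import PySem

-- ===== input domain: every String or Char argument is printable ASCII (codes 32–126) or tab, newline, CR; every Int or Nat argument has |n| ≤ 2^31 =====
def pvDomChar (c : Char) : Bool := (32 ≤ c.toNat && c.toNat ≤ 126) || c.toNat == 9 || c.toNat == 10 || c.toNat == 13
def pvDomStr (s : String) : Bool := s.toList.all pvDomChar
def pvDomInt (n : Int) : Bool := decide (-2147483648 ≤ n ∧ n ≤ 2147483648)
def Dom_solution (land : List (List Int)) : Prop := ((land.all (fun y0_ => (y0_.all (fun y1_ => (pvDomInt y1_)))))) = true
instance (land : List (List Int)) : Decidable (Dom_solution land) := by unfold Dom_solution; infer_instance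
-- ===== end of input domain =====

-- B computes each dp row via prefix/suffix running maxima of the previous dp row instead of A's nested j/k scans; same return value on all inputs where A returns.

-- ===== PORT A =====
-- answer[i][k] = max(answer[i][k], answer[i-1][j] + land[i][k]) for j≠k, j,k < len(land[i]).
-- `getD _ 0` stands for Python's raising indexing; under Pre_solution every index is in range, so it is exact.
def aRow (prev row : List Int) : List Int :=
  (List.range row.length).foldl (fun cur j =>
    (List.range row.length).foldl (fun c k =>
      if j = k then c
      else c.set k (max (c.getD k 0) (prev.getD j 0 + row.getD k 0))) cur) row

def aRows : List Int → List (List Int) → List (List Int)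
  | _, [] => []
  | prev, r :: rest => aRow prev r :: aRows (aRow prev r) rest

def solution (land : List (List Int)) : Int :=
  match land with
  | [] => 0  -- unreachable under Pre_solution: Python raises IndexError on answer[-1]
  | first :: rest =>
    (PySem.List.max? ((first :: aRows first rest).getLastD []) (fun x => x)).getD 0

-- ===== PORT B =====
-- bPref b p ! k = max(b, p[0..k-1]); bSuf p ! k = max(0, p[k..]).
def bPref : Int → List Int → List Int
  | b, [] => [b]
  | b, v :: vs => b :: bPref (max b v) vs

def bSuf : List Int → List Int
  | [] => [0]
  | v :: vs => max v ((bSuf vs).getD 0 0) :: bSuf vs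

def bRow (p row : List Int) : List Int :=
  (List.range row.length).map (fun k =>
    row.getD k 0 + max ((bPref 0 p).getD k 0) ((bSuf p).getD (k + 1) 0))

def bRows : List Int → List (List Int) → List Int
  | dp, [] => dp
  | dp, row :: rest =>
    bRows (if 2 ≤ row.length then bRow (dp.take row.length) row else row) rest

def solution_alt (land : List (List Int)) : Int :=
  match land with
  | [] => 0  -- unreachable under Pre_solution
  | first :: rest => (PySem.List.max? (bRows first rest) (fun x => x)).getD 0

-- ===== PRECONDITION & SPEC =====
-- Pre_solution = exactly the inputs where Python A returns: land nonempty and its last row nonempty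
-- (otherwise A raises IndexError resp. ValueError), and no row of width at least 2 wider than its
-- predecessor (otherwise A raises IndexError reading the previous answer row).
def Pre_solution (land : List (List Int)) : Prop :=
  land ≠ [] ∧ land.getLastD [] ≠ [] ∧
    ∀ p ∈ land.zip land.tail, 2 ≤ p.2.length → p.2.length ≤ p.1.length

instance (land : List (List Int)) : Decidable (Pre_solution land) := by
  unfold Pre_solution; infer_instance

def pvWitness_solution : List (List Int) := [[1, 2, 3], [4, 5, 6]]

def Spec_solution (land : List (List Int)) (out : Int) : Prop := out = solution_alt land
instance (land : List (List Int)) (out : Int) : Decidable (Spec_solution land out) := by unfold Spec_solution; infer_instance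

-- ===== CLAIM (what is proved, stated in full; the proofs are below) =====
def Claim_equal_solution : Prop := ∀ (land : List (List Int)), Dom_solution land → Pre_solution land → Spec_solution land (solution land)

-- ===== LEMMAS AND PROOFS =====

theorem set_getD_self (c : List Int) : ∀ (k : Nat), c.set k (c.getD k 0) = c := by
  induction c with
  | nil => intro k; rfl
  | cons a t ih => intro k; cases k with
    | zero => rfl
    | succ k => simp only [List.set, List.getD_cons_succ]; rw [ih k]

theorem foldl_max_max (l : List Int) : ∀ (a b : Int), l.foldl max (max a b) = max a (l.foldl max b) := by
  induction l with
  | nil => intro a b; rfl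
  | cons v t ih => intro a b; simp only [List.foldl_cons]
                   rw [show max (max a b) v = max a (max b v) by omega, ih]

theorem zero_le_foldl_max (l : List Int) : (0 : Int) ≤ l.foldl max 0 := by
  have h : ∀ (l : List Int) (b : Int), b ≤ l.foldl max b := by
    intro l; induction l with
    | nil => intro b; simp
    | cons v t ih => intro b; simp only [List.foldl_cons]
                     exact le_trans (le_max_left b v) (ih _)
  exact h l 0

theorem getD_map_range (f : Nat → Int) (m k : Nat) (hk : k < m) :
    ((List.range m).map f).getD k 0 = f k := by
  rw [List.getD_eq_getElem?_getD, List.getElem?_map, List.getElem?_range hk]; rfl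

theorem foldl_set (g : Nat → Int → Int) :
    ∀ (n : Nat) (c : List Int), n ≤ c.length →
      (List.range n).foldl (fun c k => c.set k (g k (c.getD k 0))) c
        = (List.range n).map (fun k => g k (c.getD k 0)) ++ c.drop n := by
  intro n
  induction n with
  | zero => intro c h; simp
  | succ n ih =>
    intro c h
    rw [List.range_succ, List.foldl_append, List.map_append, ih c (by omega)]
    have hlen : ((List.range n).map (fun k => g k (c.getD k 0))).length = n := by simp
    have hn : n < c.length := by omega
    have hdropc := List.drop_eq_getElem_cons hn
    have hget : ((List.range n).map (fun k => g k (c.getD k 0)) ++ c.drop n).getD n 0 = c.getD n 0 := by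
      rw [List.getD_eq_getElem?_getD, List.getElem?_append_right (by omega), hlen]
      simp [List.getElem?_drop, List.getD_eq_getElem?_getD]
    simp only [List.foldl_cons, List.foldl_nil]
    rw [hget, List.set_append, hlen]
    simp only [Nat.lt_irrefl, if_false, Nat.sub_self]
    rw [hdropc, List.set_cons_zero]
    simp [List.getD_eq_getElem?_getD, List.getElem?_eq_getElem hn]

theorem map_range_take (p : List Int) : ∀ (k : Nat), k ≤ p.length →
    (List.range k).map (fun j => p.getD j 0) = p.take k := by
  intro k
  induction k with
  | zero => intro h; simp
  | succ k ih =>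
    intro h
    rw [List.range_succ, List.map_append, ih (by omega), List.take_add_one]
    have hk : k < p.length := by omega
    simp [List.getElem?_eq_getElem hk, List.getD_eq_getElem?_getD]

theorem map_range'_drop (p : List Int) : ∀ (n i : Nat), i + n ≤ p.length →
    (List.range' i n).map (fun j => p.getD j 0) = (p.drop i).take n := by
  intro n
  induction n with
  | zero => intro i h; simp
  | succ n ih =>
    intro i h
    have hi : i < p.length := by omega
    rw [List.range'_succ, List.map_cons, ih (i+1) (by omega),
        List.drop_eq_getElem_cons hi, List.take_succ_cons]
    simp [List.getD_eq_getElem?_getD, List.getElem?_eq_getElem hi]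

theorem foldl_skip (k : Nat) (f : Int → Nat → Int) :
    ∀ (l : List Nat) (z : Int),
      l.foldl (fun a j => if j = k then a else f a j) z = (l.filter (fun j => j != k)).foldl f z := by
  intro l
  induction l with
  | nil => intro z; rfl
  | cons j t ih =>
    intro z
    by_cases hj : j = k
    · simp [hj, ih]
    · simp [hj, ih]

theorem range_filter_ne (m k : Nat) (hk : k < m) :
    (List.range m).filter (fun j => j != k) = List.range k ++ List.range' (k + 1) (m - (k + 1)) := by
  obtain ⟨r, hr⟩ : ∃ r, m = k + (1 + r) := ⟨m - (k+1), by omega⟩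
  subst hr
  have hsub : k + (1 + r) - (k + 1) = r := by omega
  rw [hsub, List.range_eq_range', ← List.range'_append, List.filter_append]
  have h1 : (List.range' 0 k).filter (fun j => j != k) = List.range' 0 k := by
    apply List.filter_eq_self.mpr
    intro j hj
    have := List.mem_range'_1.mp hj
    simp; omega
  have h2 : (List.range' (0 + 1 * k) (1 + r)).filter (fun j => j != k)
      = List.range' (k + 1) r := by
    have he : 1 + r = r + 1 := by omega
    rw [Nat.zero_add, Nat.one_mul, he, List.range'_succ, List.filter_cons]
    simp only [bne_self_eq_false, Bool.false_eq_true, if_false]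
    rw [List.filter_eq_self.mpr]
    intro j hj
    have := List.mem_range'_1.mp hj
    simp; omega
  rw [h1, h2, List.range_eq_range']

theorem foldl_max_shift (q : Nat → Int) (R : Int) :
    ∀ (js : List Nat) (z : Int), R ≤ z →
      js.foldl (fun a j => max a (q j + R)) z = max z (R + (js.map q).foldl max 0) := by
  intro js
  induction js with
  | nil => intro z h; simp; omega
  | cons j t ih =>
    intro z h
    simp only [List.foldl_cons, List.map_cons]
    rw [ih (max z (q j + R)) (by omega)]
    rw [show max (0:Int) (q j) = max (q j) 0 by omega, foldl_max_max]
    omega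


def Ffold (prev row : List Int) (k n : Nat) : Int :=
  (List.range n).foldl
    (fun acc j => if j = k then acc else max acc (prev.getD j 0 + row.getD k 0))
    (row.getD k 0)

theorem inner_eq_map (prev row : List Int) (j : Nat) (c : List Int) (hc : c.length = row.length) :
    (List.range row.length).foldl (fun c k =>
        if j = k then c
        else c.set k (max (c.getD k 0) (prev.getD j 0 + row.getD k 0))) c
      = (List.range row.length).map (fun k =>
        if j = k then c.getD k 0 else max (c.getD k 0) (prev.getD j 0 + row.getD k 0)) := by
  have hbody : (fun (c : List Int) (k : Nat) =>
        if j = k then c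
        else c.set k (max (c.getD k 0) (prev.getD j 0 + row.getD k 0)))
      = (fun (c : List Int) (k : Nat) =>
        c.set k (if j = k then c.getD k 0 else max (c.getD k 0) (prev.getD j 0 + row.getD k 0))) := by
    funext c k
    by_cases h : j = k
    · rw [if_pos h, if_pos h]; exact (set_getD_self c k).symm
    · rw [if_neg h, if_neg h]
  rw [hbody, foldl_set
      (fun k x => if j = k then x else max x (prev.getD j 0 + row.getD k 0))
      row.length c (by omega)]
  rw [List.drop_eq_nil_of_le (by omega), List.append_nil]

theorem map_range_getD_self (c : List Int) : (List.range c.length).map (fun k => c.getD k 0) = c := by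
  rw [map_range_take c c.length (le_refl _), List.take_length]

theorem aRow_eq_map (prev row : List Int) :
    aRow prev row = (List.range row.length).map (fun k => Ffold prev row k row.length) := by
  suffices h : ∀ n, (List.range n).foldl (fun cur j =>
      (List.range row.length).foldl (fun c k =>
        if j = k then c
        else c.set k (max (c.getD k 0) (prev.getD j 0 + row.getD k 0))) cur) row
      = (List.range row.length).map (fun k => Ffold prev row k n) by
    exact h row.length
  intro n
  induction n with
  | zero =>
    simp only [List.range_zero, List.foldl_nil, Ffold]
    exact (map_range_getD_self row).symm
  | succ n ih =>
    rw [List.range_succ, List.foldl_append, ih, List.foldl_cons, List.foldl_nil]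
    rw [inner_eq_map prev row n _ (by simp)]
    apply List.map_congr_left
    intro k hk
    have hkm : k < row.length := List.mem_range.mp hk
    have hget : ((List.range row.length).map (fun k => Ffold prev row k n)).getD k 0
        = Ffold prev row k n := getD_map_range _ _ _ hkm
    rw [hget]
    show _ = Ffold prev row k (n+1)
    unfold Ffold
    rw [List.range_succ, List.foldl_append, List.foldl_cons, List.foldl_nil]

theorem aRow_length (prev row : List Int) : (aRow prev row).length = row.length := by
  rw [aRow_eq_map]; simp



theorem bPref_getD (p : List Int) : ∀ (b : Int) (k : Nat), k ≤ p.length →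
    (bPref b p).getD k 0 = (p.take k).foldl max b := by
  induction p with
  | nil => intro b k h; have hk : k = 0 := by simpa using h
           subst hk; simp [bPref]
  | cons v vs ih =>
    intro b k h
    cases k with
    | zero => simp [bPref]
    | succ k => simpa [bPref] using ih (max b v) k (by simpa using h)

theorem bSuf_getD (p : List Int) : ∀ (k : Nat), (bSuf p).getD k 0 = (p.drop k).foldl max 0 := by
  induction p with
  | nil => intro k; cases k <;> simp [bSuf]
  | cons v vs ih =>
    intro k
    cases k with
    | zero =>
      simp only [bSuf, List.getD_cons_zero, List.drop_zero, List.foldl_cons]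
      rw [ih 0, List.drop_zero, show max (0:Int) v = max v 0 by omega, foldl_max_max]
    | succ k => simpa [bSuf] using ih k

theorem foldl_max_zero_append (l1 l2 : List Int) :
    (l1 ++ l2).foldl max 0 = max (l1.foldl max 0) (l2.foldl max 0) := by
  rw [List.foldl_append]
  have h1 : (0:Int) ≤ l1.foldl max 0 := zero_le_foldl_max l1
  conv_lhs => rw [show l1.foldl max 0 = max (l1.foldl max 0) 0 from by omega]
  rw [foldl_max_max]

theorem Ffold_eq (prev row : List Int) (k : Nat) (hk : k < row.length)
    (hm : row.length ≤ prev.length) :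
    Ffold prev row k row.length
      = row.getD k 0 + max ((prev.take k).foldl max 0)
          (((prev.drop (k + 1)).take (row.length - (k + 1))).foldl max 0) := by
  unfold Ffold
  rw [foldl_skip k (fun a j => max a (prev.getD j 0 + row.getD k 0)) (List.range row.length),
      range_filter_ne row.length k hk,
      foldl_max_shift (fun j => prev.getD j 0) (row.getD k 0) _ _ (le_refl _),
      List.map_append,
      map_range_take prev k (by omega),
      map_range'_drop prev (row.length - (k+1)) (k+1) (by omega),
      foldl_max_zero_append]
  have h1 : (0:Int) ≤ (prev.take k).foldl max 0 := zero_le_foldl_max _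
  omega


theorem aRow_eq_bStep (prev row : List Int) (h : 2 ≤ row.length → row.length ≤ prev.length) :
    (if 2 ≤ row.length then bRow (prev.take row.length) row else row) = aRow prev row := by
  by_cases h2 : 2 ≤ row.length
  · rw [if_pos h2]
    have hm : row.length ≤ prev.length := h h2
    have hp : (prev.take row.length).length = row.length := by
      rw [List.length_take]; omega
    rw [aRow_eq_map]
    unfold bRow
    apply List.map_congr_left
    intro k hk
    have hkm : k < row.length := List.mem_range.mp hk
    rw [Ffold_eq prev row k hkm hm,
        bPref_getD (prev.take row.length) 0 k (by omega),
        bSuf_getD (prev.take row.length) (k+1),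
        List.take_take, Nat.min_eq_left (by omega), List.drop_take]
  · rw [if_neg h2]
    rcases row with _ | ⟨v, _ | ⟨w, t⟩⟩
    · rfl
    · rfl
    · exfalso; apply h2; simp



theorem rows_eq : ∀ (rows : List (List Int)) (prev : List Int),
    (∀ p ∈ (prev :: rows).zip rows, 2 ≤ p.2.length → p.2.length ≤ p.1.length) →
    bRows prev rows = (aRows prev rows).getLastD prev := by
  intro rows
  induction rows with
  | nil => intro prev h; rfl
  | cons row rest ih =>
    intro prev h
    have hpr : 2 ≤ row.length → row.length ≤ prev.length :=
      h (prev, row) (by simp [List.zip_cons_cons])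
    show bRows (if 2 ≤ row.length then bRow (prev.take row.length) row else row) rest
        = (aRow prev row :: aRows (aRow prev row) rest).getLastD prev
    rw [aRow_eq_bStep prev row hpr, List.getLastD_cons]
    apply ih
    intro p hp
    cases rest with
    | nil => simp at hp
    | cons r2 rest' =>
      rw [List.zip_cons_cons] at hp
      rcases List.mem_cons.mp hp with hp1 | hp2
      · subst hp1
        intro hlen
        rw [aRow_length]
        exact h (row, r2) (by simp [List.zip_cons_cons]) hlen
      · exact h p (by simp [List.zip_cons_cons]; right; right; exact hp2)

-- ===== VERDICT (by name: the statement is the Claim_ definition above) =====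
theorem solution_spec : Claim_equal_solution := by
  intro land _ hpre
  unfold Spec_solution
  obtain ⟨hne, _, hchain⟩ := hpre
  match land with
  | [] => exact absurd rfl hne
  | first :: rest =>
    show solution (first :: rest) = solution_alt (first :: rest)
    simp only [solution, solution_alt, List.getLastD_cons]
    rw [rows_eq rest first hchain]
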